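-- pv_equiv track=rewrite | github.com/Analisis-Project/Backend-Analisis | Models/Matrix_Heuristic.py | procesar_diccionario
-- ===== SOURCE A (Python) =====
-- def procesar_diccionario(dic):
--     nuevo_dic = {}
--     for clave, valor in dic.items():
--         # Contar la frecuencia de cada carácter en el valor
--         contador = {}
--         for char in valor:
--             if char in contador:
--                 contador[char] += 1
--             else:
--                 contador[char] = 1
--
--         # Encontrar el carácter con la frecuencia máxima
--         max_frecuencia = max(contador.values())
--         max_caracteres = [k for k, v in contador.items() if v == max_frecuencia]
--
--         # Si hay solo un carácter con la máxima frecuencia, actualizar el valor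
--         if len(max_caracteres) == 1:
--             nuevo_dic[clave] = max_caracteres[0]
--
--     return nuevo_dic
-- ===== SOURCE B (Python) =====
-- def procesar_diccionario(dic):
--     res = {}
--     for clave, valor in dic.items():
--         s = sorted(valor)
--         runs = []  # (character, run length) for each maximal run of equal chars
--         i = 0
--         n = len(s)
--         while i < n:
--             j = i
--             while j < n and s[j] == s[i]:
--                 j += 1
--             runs.append((s[i], j - i))
--             i = j
--         m = max(length for _, length in runs)  # ValueError on empty valor, as intended
--         if sum(1 for _, length in runs if length == m) == 1:
--             res[clave] = next(c for c, length in runs if length == m)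
--     return res
-- ===== Notes on version B (the rewrite author's own statement) =====
-- stated objective: alternative
-- what changed: B replaces A's frequency dictionary with sorting each value's characters and a single scan grouping them into runs of equal characters, selecting the key's character when exactly one run has maximal length; the hash-counting pass disappears.
import Mathlib
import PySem

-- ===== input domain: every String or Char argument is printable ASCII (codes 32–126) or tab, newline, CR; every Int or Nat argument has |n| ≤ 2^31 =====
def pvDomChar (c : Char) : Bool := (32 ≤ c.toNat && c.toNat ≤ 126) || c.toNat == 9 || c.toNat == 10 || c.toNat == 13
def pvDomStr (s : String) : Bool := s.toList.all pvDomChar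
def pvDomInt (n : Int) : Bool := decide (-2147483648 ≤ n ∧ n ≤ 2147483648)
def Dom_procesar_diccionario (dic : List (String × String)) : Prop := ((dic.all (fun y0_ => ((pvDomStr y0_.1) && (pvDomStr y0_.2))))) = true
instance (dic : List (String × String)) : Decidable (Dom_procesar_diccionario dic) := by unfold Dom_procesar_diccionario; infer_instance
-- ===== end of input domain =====

-- B sorts each value's characters and scans them once, grouping equal characters into runs,
-- instead of A's per-character frequency dictionary; same result: key ↦ its uniquely
-- most-frequent character (keys with a tie for the maximum are dropped).


-- ===== PORT A =====
-- one iteration of A's outer loop: count characters in valor, pick the unique most frequent one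
def pvStepA (nuevo : PySem.Dict String String) (kv : String × String) : PySem.Dict String String :=
  let contador : PySem.Dict Char Int := kv.2.toList.foldl
    (fun c ch => if c.contains ch then c.modify ch 0 (· + 1) else c.insert ch 1) PySem.Dict.empty
  match PySem.List.max? contador.values (fun y => y) with
  | none => nuevo   -- contador empty: Python's max([]) raises ValueError (excluded by Pre_)
  | some max_frecuencia =>
    let max_caracteres := (contador.items.filter (fun p => p.2 == max_frecuencia)).map (·.1)
    match max_caracteres with
    | [c] => nuevo.insert kv.1 (String.ofList [c])   -- len == 1: take max_caracteres[0]
    | _ => nuevo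

def procesar_diccionario (dic : List (String × String)) : List (String × String) :=
  (dic.foldl pvStepA PySem.Dict.empty).items

-- ===== PORT B =====
-- the inner while-loops of Source B: group a (sorted) char list into maximal runs (char, run length)
def pvRuns : List Char → List (Char × Int)
  | [] => []
  | c :: rest =>
    (c, (1 + (rest.takeWhile (· == c)).length : Int)) :: pvRuns (rest.dropWhile (· == c))
termination_by l => l.length
decreasing_by
  exact Nat.lt_succ_of_le (List.length_dropWhile_le _ _)

-- one iteration of Source B's outer loop: sort, collect runs, keep the key iff one run is longest
def pvStepB (res : PySem.Dict String String) (kv : String × String) : PySem.Dict String String :=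
  let runs := pvRuns (PySem.List.sorted kv.2.toList (fun c => c))
  match PySem.List.max? (runs.map (·.2)) (fun y => y) with
  | none => res   -- runs empty: Python's max(empty generator) raises ValueError (excluded by Pre_)
  | some m =>
    if runs.countP (fun r => r.2 == m) == 1 then
      match runs.find? (fun r => r.2 == m) with
      | some r => res.insert kv.1 (String.ofList [r.1])
      | none => res
    else res

def procesar_diccionario_alt (dic : List (String × String)) : List (String × String) :=
  (dic.foldl pvStepB PySem.Dict.empty).items

-- ===== PRECONDITION & SPEC =====
-- Pre_ excludes dicts with an empty-string value: there Python A raises ValueError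
-- (max() of an empty sequence), and Python B raises the same error.
def Pre_procesar_diccionario (dic : List (String × String)) : Prop :=
  ∀ p ∈ dic, p.2 ≠ ""
instance (dic : List (String × String)) : Decidable (Pre_procesar_diccionario dic) := by
  unfold Pre_procesar_diccionario; infer_instance

def pvWitness_procesar_diccionario : (List (String × String)) :=
  [("ab", "xxy"), ("c", "zz"), ("d", "pq")]

def Spec_procesar_diccionario (dic : List (String × String)) (out : List (String × String)) : Prop := out = procesar_diccionario_alt dic
instance (dic : List (String × String)) (out : List (String × String)) : Decidable (Spec_procesar_diccionario dic out) := by unfold Spec_procesar_diccionario; infer_instance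

-- ===== CLAIM (what is proved, stated in full; the proofs are below) =====
def Claim_equal_procesar_diccionario : Prop := ∀ (dic : List (String × String)), Dom_procesar_diccionario dic → Pre_procesar_diccionario dic → Spec_procesar_diccionario dic (procesar_diccionario dic)

-- ===== LEMMAS AND PROOFS =====

-- A's counting loop (membership test + increment-or-insert) is collections.Counter
theorem pvCountA_eq_counter (l : List Char) :
    l.foldl (fun c ch => if c.contains ch then c.modify ch 0 (· + 1) else c.insert ch 1)
      PySem.Dict.empty = PySem.Dict.counter l := by
  rw [PySem.Dict.counter_eq_foldl]
  apply PySem.List.foldl_congr_mem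
  intro acc x _
  by_cases h : acc.contains x = true
  · simp [h]
  · simp only [Bool.not_eq_true] at h
    simp [h, PySem.Dict.modify, PySem.Dict.getD_of_not_contains acc 0 h]

-- folding Set.add over elements avoiding the head keeps the head in front
theorem pvFoldl_add_cons {a : Char} {t s : List Char} (h : a ∉ t) :
    t.foldl PySem.Set.add (a :: s) = a :: t.foldl PySem.Set.add s := by
  induction t generalizing s with
  | nil => rfl
  | cons x t ih =>
    simp only [List.mem_cons, not_or] at h
    simp only [List.foldl_cons]
    rw [show PySem.Set.add (a :: s) x = a :: PySem.Set.add s x by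
      rw [PySem.Set.add_eq_ite, PySem.Set.add_eq_ite]
      simp [List.mem_cons, Ne.symm h.1]
      split <;> simp_all]
    exact ih h.2

-- folding Set.add over copies of an element already present is the identity
theorem pvFoldl_add_allc {c : Char} {t : List Char} (h : ∀ x ∈ t, x = c) (s : List Char)
    (hc : c ∈ s) : t.foldl PySem.Set.add s = s := by
  induction t with
  | nil => rfl
  | cons x t ih =>
    have hx := h x (by simp)
    subst hx
    simp only [List.foldl_cons, PySem.Set.add_of_mem hc]
    exact ih (fun y hy => h y (by simp [hy]))

-- on a sorted list, the runs are exactly (distinct element, its count), in first-occurrence order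
theorem pvRuns_sorted (s : List Char) (hs : List.Pairwise (· ≤ ·) s) :
    pvRuns s = (PySem.Set.ofList s).map (fun c => (c, (s.count c : Int))) := by
  induction s using pvRuns.induct with
  | case1 => rw [pvRuns]; rfl
  | case2 c rest ih =>
    set t1 := rest.takeWhile (· == c) with ht1
    set t2 := rest.dropWhile (· == c) with ht2
    have hrest : t1 ++ t2 = rest := List.takeWhile_append_dropWhile
    have h1 : ∀ x ∈ t1, x = c := fun x hx => by
      have := List.mem_takeWhile_imp hx; simpa using this
    have hp2 : List.Pairwise (· ≤ ·) t2 :=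
      List.Pairwise.sublist ((List.dropWhile_sublist _).trans (List.sublist_cons_self c rest)) hs
    have hcle : ∀ x ∈ rest, c ≤ x := fun x hx => (List.pairwise_cons.mp hs).1 x hx
    have hc2 : c ∉ t2 := by
      intro hmem
      rcases ht2e : t2 with _ | ⟨h0, t2'⟩
      · simp [ht2e] at hmem
      · have hhne : (h0 == c) = false := by
          have := List.head_dropWhile_not (· == c) (l := rest) (by rw [← ht2, ht2e]; simp)
          simpa [← ht2, ht2e] using this
        have hh0 : h0 ∈ rest := by
          have : t2.Sublist rest := List.dropWhile_sublist _
          exact this.mem (by simp [ht2e])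
        have hch : c < h0 := lt_of_le_of_ne (hcle h0 hh0)
          (by simpa [eq_comm] using beq_eq_false_iff_ne.mp hhne)
        rw [ht2e] at hmem
        rcases List.mem_cons.mp hmem with h | h
        · exact absurd h.symm (ne_of_lt hch).symm
        · have : h0 ≤ c := (List.pairwise_cons.mp (by rwa [ht2e] at hp2)).1 c h
          exact absurd (lt_of_lt_of_le hch this) (lt_irrefl c)
    have hofl : PySem.Set.ofList (c :: rest) = c :: PySem.Set.ofList t2 := by
      show (c :: rest).foldl PySem.Set.add [] = _
      rw [List.foldl_cons, show PySem.Set.add [] c = [c] from rfl, ← hrest, List.foldl_append,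
        pvFoldl_add_allc h1 [c] (by simp)]
      exact pvFoldl_add_cons hc2
    have hcnt_c : ((c :: rest).count c : Int) = 1 + t1.length := by
      have : rest.count c = t1.length := by
        rw [← hrest, List.count_append]
        have e1 : t1.count c = t1.length := List.count_eq_length.mpr (fun x hx => by simp [h1 x hx])
        have e2 : t2.count c = 0 := List.count_eq_zero.mpr hc2
        omega
      rw [List.count_cons_self]
      push_cast [this]
      ring
    rw [show pvRuns (c :: rest) = (c, (1 + t1.length : Int)) :: pvRuns t2 by rw [pvRuns]]
    rw [hofl, List.map_cons, ih hp2, ← hcnt_c]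
    congr 1
    apply List.map_congr_left
    intro d hd
    have hd2 : d ∈ t2 := (PySem.Set.mem_ofList _ _).mp hd
    have hdc : d ≠ c := fun h => hc2 (h ▸ hd2)
    have : (c :: rest).count d = t2.count d := by
      rw [List.count_cons_of_ne (Ne.symm hdc), ← hrest, List.count_append]
      have : t1.count d = 0 := List.count_eq_zero.mpr (fun hx => hdc (h1 d hx))
      omega
    simp [this]

-- max() without key is invariant under permutation of its argument
theorem pvMax?_perm {l l' : List Int} (h : l.Perm l') :
    PySem.List.max? l (fun y => y) = PySem.List.max? l' (fun y => y) := by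
  cases hm : PySem.List.max? l (fun y => y) with
  | none =>
    have hl : l = [] := (PySem.List.max?_eq_none_iff l _).mp hm
    have : l' = [] := (h.symm.trans (hl ▸ List.Perm.refl _)).eq_nil
    rw [this, (PySem.List.max?_eq_none_iff [] _).mpr rfl]
  | some m =>
    cases hm' : PySem.List.max? l' (fun y => y) with
    | none =>
      have : l' = [] := (PySem.List.max?_eq_none_iff l' _).mp hm'
      exact absurd (h.mem_iff.mp (PySem.List.max?_mem hm)) (by simp [this])
    | some m' =>
      have h1 : m ≤ m' := PySem.List.max?_isMax hm' m (h.mem_iff.mp (PySem.List.max?_mem hm))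
      have h2 : m' ≤ m := PySem.List.max?_isMax hm m' (h.symm.mem_iff.mp (PySem.List.max?_mem hm'))
      exact congrArg some (le_antisymm h1 h2)

-- the two loop bodies agree: Counter items and sorted-runs are permutations of each other,
-- so the maximum frequency, the number of maximisers, and (when unique) the maximiser coincide
theorem pvStepA_eq_pvStepB : pvStepA = pvStepB := by
  funext nuevo kv
  simp only [pvStepA, pvStepB]
  set v := kv.2.toList with hv
  set s := PySem.List.sorted v (fun c => c) with hsdef
  have hsp : s.Perm v := PySem.List.sorted_perm v (fun c => c) false
  have hR : pvRuns s = (PySem.Set.ofList s).map (fun c => (c, (v.count c : Int))) := by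
    rw [pvRuns_sorted s (PySem.List.sorted_pairwise v (fun c => c))]
    exact List.map_congr_left (fun c _ => by rw [hsp.count_eq])
  have hitems : (v.foldl
      (fun c ch => if c.contains ch then c.modify ch 0 (· + 1) else c.insert ch 1)
      PySem.Dict.empty).items = (PySem.Set.ofList v).map (fun k => (k, (v.count k : Int))) := by
    rw [pvCountA_eq_counter, PySem.Dict.items_counter]
  set L := (PySem.Set.ofList v).map (fun k => (k, (v.count k : Int))) with hL
  have hRL : (pvRuns s).Perm L := by
    rw [hR, hL]
    exact ((List.perm_ext_iff_of_nodup (PySem.Set.nodup_ofList _) (PySem.Set.nodup_ofList _)).mpr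
      (fun a => by rw [PySem.Set.mem_ofList, PySem.Set.mem_ofList, hsp.mem_iff])).map _
  have hvals : (v.foldl
      (fun c ch => if c.contains ch then c.modify ch 0 (· + 1) else c.insert ch 1)
      PySem.Dict.empty).values = L.map (·.2) := by
    simp only [PySem.Dict.values]
    rw [hitems]
  have hmax : PySem.List.max? ((pvRuns s).map (·.2)) (fun y => y) =
      PySem.List.max? (L.map (·.2)) (fun y => y) := pvMax?_perm (hRL.map _)
  rw [hvals, hitems, hmax]
  cases hm : PySem.List.max? (L.map (·.2)) (fun y => y) with
  | none => rfl
  | some m =>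
    have hfp : ((pvRuns s).filter (fun r => r.2 == m)).Perm (L.filter (fun r => r.2 == m)) :=
      hRL.filter _
    have hcnt : (pvRuns s).countP (fun r => r.2 == m) = (L.filter (fun r => r.2 == m)).length := by
      rw [List.countP_eq_length_filter]; exact hfp.length_eq
    rcases hfl : L.filter (fun r => r.2 == m) with _ | ⟨x, _ | ⟨y, t⟩⟩
    · have hc0 : (pvRuns s).countP (fun r => r.2 == m) = 0 := by rw [hcnt, hfl]; rfl
      simp [hfl, hc0]
    · have h1 : (pvRuns s).filter (fun r => r.2 == m) = [x] := by
        have := hfp; rw [hfl] at this; exact List.perm_singleton.mp this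
      have hfind : (pvRuns s).find? (fun r => r.2 == m) = some x := by
        rw [← List.head?_filter, h1]; rfl
      have hc1 : (pvRuns s).countP (fun r => r.2 == m) = 1 := by rw [hcnt, hfl]; rfl
      simp [hfl, hc1, hfind]
    · have hc2 : (pvRuns s).countP (fun r => r.2 == m) = t.length + 2 := by
        rw [hcnt, hfl]; simp
      simp [hfl, hc2]

-- ===== VERDICT (by name: the statement is the Claim_ definition above) =====
theorem procesar_diccionario_spec : Claim_equal_procesar_diccionario := by
  intro dic _ _
  unfold Spec_procesar_diccionario procesar_diccionario procesar_diccionario_alt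
  rw [pvStepA_eq_pvStepB]
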